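-- pv_equiv track=rewrite | github.com/ramonmeza/wave_function_collapse | src/wave_function_collapse/simpler.py | find_lowest_entropy
-- ===== SOURCE A (Python) =====
-- from enum import IntEnum
-- from typing import NamedTuple, Optional
--
-- class Tiles(IntEnum):
--     UNSET = -1
--     SEA = 0
--     COAST = 1
--     LAND = 2
--
-- def find_lowest_entropy(map: list[list[Tiles]]) -> list[int]:
--     # find lowest length (entropy heuristic)
--     lowest_length: Optional[int] = None
--     lowest_indices: list[int] = []
--     for i, options in enumerate(map):
--         options_len: int = len(options)
--         if options_len == 1:
--             continue
--
--         if lowest_length is None or options_len < lowest_length: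
--             # first or new lowest, clear accumulated and add new lowest
--             lowest_length = options_len
--             lowest_indices.clear()
--             lowest_indices.append(i)
--         elif options_len == lowest_length:
--             lowest_indices.append(i)
--
--     # return list of indices into map with lowest entropy
--     return lowest_indices
-- ===== SOURCE B (Python) =====
-- def find_lowest_entropy(map: list) -> list:
--     # first pass: lowest option count among undecided rows (len != 1)
--     lengths = [len(o) for o in map if len(o) != 1]
--     if not lengths:
--         return []
--     m = min(lengths)
--     # second pass: select all indices whose row has that count (m != 1 by construction)
--     return [i for i, o in enumerate(map) if len(o) == m]
-- ===== Notes on version B (the rewrite author's own statement) =====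
-- stated objective: simpler
-- what changed: Replaces A's single-pass accumulator with clear-on-new-minimum bookkeeping by a two-pass find-the-minimum-then-select structure (min over filtered lengths, then a comprehension selecting indices with that length).
import Mathlib
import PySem

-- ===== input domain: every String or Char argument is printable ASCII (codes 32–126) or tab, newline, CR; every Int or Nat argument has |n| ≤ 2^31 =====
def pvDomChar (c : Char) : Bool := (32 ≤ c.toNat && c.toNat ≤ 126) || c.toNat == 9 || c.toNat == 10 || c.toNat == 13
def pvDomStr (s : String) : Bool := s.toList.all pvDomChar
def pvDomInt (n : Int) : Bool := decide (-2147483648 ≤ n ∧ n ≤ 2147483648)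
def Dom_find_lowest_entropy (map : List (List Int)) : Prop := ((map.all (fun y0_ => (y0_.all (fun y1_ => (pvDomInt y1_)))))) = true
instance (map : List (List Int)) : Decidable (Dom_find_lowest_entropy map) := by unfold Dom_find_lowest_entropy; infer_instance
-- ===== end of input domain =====

-- B replaces A's clear-on-new-minimum accumulator loop by a two-pass min-then-select structure (simpler decomposition, same O(n) cost).


-- ===== PORT A =====
-- the 'for i, options in enumerate(map)' loop, carrying i, lowest_length, lowest_indices
def goA : List (List Int) → Int → Option Int → List Int → List Int
  | [], _, _, acc => acc
  | o :: t, i, lo, acc =>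
    let n : Int := o.length
    if n = 1 then goA t (i + 1) lo acc
    else
      match lo with
      | none => goA t (i + 1) (some n) [i]
      | some m =>
        if n < m then goA t (i + 1) (some n) [i]
        else if n = m then goA t (i + 1) (some m) (acc ++ [i])
        else goA t (i + 1) (some m) acc

def find_lowest_entropy (map : List (List Int)) : List Int :=
  goA map 0 none []

-- ===== PORT B =====
-- the '[i for i, o in enumerate(map) if len(o) == m]' comprehension, carrying i
def selB : List (List Int) → Int → Int → List Int
  | [], _, _ => []
  | o :: t, i, m => if (o.length : Int) = m then i :: selB t (i + 1) m else selB t (i + 1) m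

def find_lowest_entropy_alt (map : List (List Int)) : List Int :=
  let lengths : List Int := (map.filter (fun o => (o.length : Int) ≠ 1)).map (fun o => (o.length : Int))
  match lengths.min? with
  | none => []
  | some m => selB map 0 m

-- ===== PRECONDITION & SPEC =====
def Spec_find_lowest_entropy (map : List (List Int)) (out : List Int) : Prop := out = find_lowest_entropy_alt map
instance (map : List (List Int)) (out : List Int) : Decidable (Spec_find_lowest_entropy map out) := by unfold Spec_find_lowest_entropy; infer_instance

-- ===== CLAIM (what is proved, stated in full; the proofs are below) =====
def Claim_equal_find_lowest_entropy : Prop := ∀ (map : List (List Int)), Dom_find_lowest_entropy map → Spec_find_lowest_entropy map (find_lowest_entropy map)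

-- ===== LEMMAS AND PROOFS =====

-- the minimum of the valid (length ≠ 1) lengths of t, exactly as B computes it
def minvalid (t : List (List Int)) : Option Int :=
  ((t.filter (fun o => (o.length : Int) ≠ 1)).map (fun o => (o.length : Int))).min?

lemma minvalid_cons (o : List Int) (t : List (List Int)) :
    minvalid (o :: t) =
      if (o.length : Int) = 1 then minvalid t
      else some (match minvalid t with | none => (o.length : Int) | some v => min (o.length : Int) v) := by
  simp only [minvalid, List.filter_cons]
  by_cases h : (o.length : Int) = 1
  · simp [h]
  · simp only [ne_eq, h, not_false_iff, decide_true, if_pos, List.map_cons, List.min?_cons]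
    cases hm : ((t.filter (fun o => (o.length : Int) ≠ 1)).map (fun o => (o.length : Int))).min? <;>
      simp

lemma minvalid_ne_one (t : List (List Int)) (m : Int) (h : minvalid t = some m) : m ≠ 1 := by
  have hmem : m ∈ (t.filter (fun o => (o.length : Int) ≠ 1)).map (fun o => (o.length : Int)) :=
    List.min?_mem h
  rcases List.mem_map.mp hmem with ⟨o, ho, rfl⟩
  simpa using List.of_mem_filter ho

lemma goA_some (t : List (List Int)) : ∀ (i : Int) (m : Int) (acc : List Int), m ≠ 1 →
    goA t i (some m) acc =
      (match minvalid t with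
       | none => acc ++ selB t i m
       | some v => (if min m v = m then acc else []) ++ selB t i (min m v)) := by
  induction t with
  | nil => intro i m acc _; simp [goA, minvalid, selB]
  | cons o t ih =>
    intro i m acc hm1
    rw [minvalid_cons]
    by_cases h1 : (o.length : Int) = 1
    · -- skipped row, and never selected since the selector is ≠ 1
      rw [if_pos h1]
      simp only [goA, h1, if_pos]
      rw [ih _ _ _ hm1]
      cases hv : minvalid t with
      | none =>
        have : ¬ ((o.length : Int) = m) := by rw [h1]; exact fun h => hm1 h.symm
        simp [selB, this]
      | some v =>
        have hv1 := minvalid_ne_one t v hv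
        have : ¬ ((o.length : Int) = min m v) := by
          rw [h1]; rcases min_choice m v with h | h <;> rw [h] <;>
            [exact fun h => hm1 h.symm; exact fun h => hv1 h.symm]
        simp [selB, this]
    · rw [if_neg h1]
      simp only [goA, h1, ite_false]
      by_cases hlt : (o.length : Int) < m
      · rw [if_pos hlt, ih _ _ _ h1]
        cases hv : minvalid t with
        | none =>
          have h2 : min m (o.length : Int) = (o.length : Int) := min_eq_right (le_of_lt hlt)
          have h3 : ¬ ((o.length : Int) = m) := by omega
          simp [h2, h3, selB]
        | some v =>
          have h1' : min m (min (o.length : Int) v) = min (o.length : Int) v := by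
            rcases min_choice (o.length : Int) v with h | h <;> rw [h] <;> omega
          have h2' : min (o.length : Int) v ≠ m := by
            rcases min_choice (o.length : Int) v with h | h <;> rw [h]
            · omega
            · have : v ≤ (o.length : Int) := by
                have := min_eq_right_iff.mp h; omega
              omega
          simp only [h1', h2', ite_false, List.nil_append, selB]
          by_cases he : (o.length : Int) = min (o.length : Int) v
          · rw [if_pos he, if_pos (show min (o.length : Int) v = (o.length : Int) from he.symm)]
            simp
          · rw [if_neg he, if_neg (fun h => he h.symm), List.nil_append]
      · by_cases heq : (o.length : Int) = m
        · rw [if_neg hlt, if_pos heq, ih _ _ _ hm1]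
          cases hv : minvalid t with
          | none =>
            have : min m (o.length : Int) = m := by omega
            simp [heq, selB]
          | some v =>
            have hmm : min m (min (o.length : Int) v) = min m v := by rw [heq]; omega
            simp only [hmm, selB]
            by_cases hc : min m v = m
            · rw [if_pos hc, if_pos hc, if_pos (by omega : (o.length : Int) = min m v)]
              simp
            · rw [if_neg hc, if_neg hc, if_neg (by omega : ¬ (o.length : Int) = min m v)]
        · -- o.length > m: state unchanged, row never selected
          have hgt : m < (o.length : Int) := by omega
          rw [if_neg hlt, if_neg heq, ih _ _ _ hm1]
          cases hv : minvalid t with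
          | none =>
            have : min m (o.length : Int) = m := min_eq_left (le_of_lt hgt)
            simp [this, selB, fun h => heq h]
          | some v =>
            have hmm : min m (min (o.length : Int) v) = min m v := by omega
            have hns : ¬ ((o.length : Int) = min m v) := by omega
            simp [hmm, selB, hns]

lemma goA_none (t : List (List Int)) : ∀ (i : Int),
    goA t i none [] =
      (match minvalid t with
       | none => []
       | some v => selB t i v) := by
  induction t with
  | nil => intro i; simp [goA, minvalid]
  | cons o t ih =>
    intro i
    rw [minvalid_cons]
    by_cases h1 : (o.length : Int) = 1
    · rw [if_pos h1]
      simp only [goA, h1, if_pos]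
      rw [ih]
      cases hv : minvalid t with
      | none => simp
      | some v =>
        have hv1 := minvalid_ne_one t v hv
        have : ¬ ((o.length : Int) = v) := by rw [h1]; exact fun h => hv1 h.symm
        simp [selB, this]
    · rw [if_neg h1]
      simp only [goA, h1, ite_false]
      rw [goA_some t _ _ _ h1]
      cases hv : minvalid t with
      | none => simp [selB]
      | some v =>
        simp only [selB]
        by_cases he : (o.length : Int) = min (o.length : Int) v
        · rw [if_pos he, if_pos (show min (o.length : Int) v = (o.length : Int) from he.symm)]
          simp
        · rw [if_neg he, if_neg (fun h => he h.symm), List.nil_append]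

-- ===== VERDICT (by name: the statement is the Claim_ definition above) =====
theorem find_lowest_entropy_spec : Claim_equal_find_lowest_entropy := by
  intro map _
  unfold Spec_find_lowest_entropy find_lowest_entropy find_lowest_entropy_alt
  rw [goA_none]
  rfl
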